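-- pv_equiv track=rewrite | github.com/Durgaprasad-kakarla/Geeks-for-Geeks | Basic/Swap two nibbles in a byte/swap-two-nibbles-in-a-byte.py | swapNibbles
-- ===== SOURCE A (Python) =====
-- def swapNibbles (n):
--     # code here
--     s=""
--     for i in range(7,-1,-1):
--         if n&(1<<i):
--             s+='1'
--         else:
--             s+='0'
--     return int(s[4:]+s[:4],2)
-- ===== SOURCE B (Python) =====
-- def swapNibbles(n):
--     m = n % 256
--     return (m % 16) * 16 + m // 16
-- ===== Notes on version B (the rewrite author's own statement) =====
-- stated objective: simpler
-- what changed: Replaced the 8-iteration binary-string build, slice-swap and int(...,2) reparse with a closed-form arithmetic expression on m = n % 256: (m % 16) * 16 + m // 16.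
import Mathlib
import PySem

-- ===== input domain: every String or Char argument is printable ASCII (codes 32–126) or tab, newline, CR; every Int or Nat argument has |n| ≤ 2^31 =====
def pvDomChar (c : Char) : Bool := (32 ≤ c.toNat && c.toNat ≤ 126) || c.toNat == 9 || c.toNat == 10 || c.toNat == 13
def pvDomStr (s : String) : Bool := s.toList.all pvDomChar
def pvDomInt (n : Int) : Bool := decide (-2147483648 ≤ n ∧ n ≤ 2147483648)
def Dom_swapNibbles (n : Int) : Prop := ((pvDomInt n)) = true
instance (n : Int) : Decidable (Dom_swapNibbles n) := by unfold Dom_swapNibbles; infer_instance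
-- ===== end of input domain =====

-- B replaces A's bit-by-bit binary-string build-and-reparse with a closed-form
-- arithmetic expression on n % 256 (objective: simpler).

-- ===== PORT A =====
-- i ranges over 7..0 (nonnegative), so 'i.toNat' is exact for Python's '1 << i'.
def swapNibbles (n : Int) : Int :=
  let s : List Char :=
    (PySem.List.pyRange 7 (-1) (-1)).foldl
      (fun s i => if PySem.Int.band n ((1 : Int) <<< (i.toNat : Nat)) ≠ 0 then s ++ ['1'] else s ++ ['0'])
      []
  -- int(s[4:] + s[:4], 2); s is always eight '0'/'1' chars, so the parse never fails
  (PySem.Int.ofCharsBase? (PySem.List.slice s (some 4) none ++ PySem.List.slice s none (some 4)) 2).getD 0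

-- ===== PORT B =====
def swapNibbles_alt (n : Int) : Int :=
  let m := PySem.Int.mod n 256
  PySem.Int.mod m 16 * 16 + PySem.Int.floordiv m 16

-- ===== PRECONDITION & SPEC =====
def Spec_swapNibbles (n : Int) (out : Int) : Prop := out = swapNibbles_alt n
instance (n : Int) (out : Int) : Decidable (Spec_swapNibbles n out) := by unfold Spec_swapNibbles; infer_instance

-- ===== CLAIM (what is proved, stated in full; the proofs are below) =====
def Claim_equal_swapNibbles : Prop := ∀ (n : Int), Dom_swapNibbles n → Spec_swapNibbles n (swapNibbles n)

-- ===== LEMMAS AND PROOFS =====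

set_option maxRecDepth 4096 in
theorem pv_pyRange_eval : PySem.List.pyRange 7 (-1) (-1) = [7, 6, 5, 4, 3, 2, 1, 0] := by decide

-- bit i of m depends only on m % 256 when i < 8 (Nat level)
theorem pv_nat_and_mod (m j : Nat) (h : j < 8) : m &&& 2 ^ j = m % 256 &&& 2 ^ j := by
  have h256 : (256 : Nat) = 2 ^ 8 := by norm_num
  rw [Nat.and_two_pow, Nat.and_two_pow, h256, Nat.testBit_mod_two_pow]
  simp [h]

-- complement form: 2^j - (2^j &&& m) is bit j of the bitwise complement, read off 255 - m % 256
set_option maxRecDepth 8192 in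
theorem pv_nat_compl (m j : Nat) (h : j < 8) : 2 ^ j - (2 ^ j &&& m) = (255 - m % 256) &&& 2 ^ j := by
  have hflip : ∀ x : Fin 256, ∀ jj : Fin 8, (255 - x.val).testBit jj.val = !x.val.testBit jj.val := by decide
  have hmlt : m % 256 < 256 := Nat.mod_lt _ (by norm_num)
  have h2 : (255 - m % 256).testBit j = !m.testBit j := by
    have hx : (255 - m % 256).testBit j = !(m % 256).testBit j := hflip ⟨m % 256, hmlt⟩ ⟨j, h⟩
    have hmb : (m % 256).testBit j = m.testBit j := by
      rw [show (256 : Nat) = 2 ^ 8 by norm_num, Nat.testBit_mod_two_pow, decide_eq_true h,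
        Bool.true_and]
    rw [hx, hmb]
  rw [Nat.and_comm (2 ^ j) m, Nat.and_two_pow, Nat.and_two_pow, h2]
  cases hm : m.testBit j <;> simp

-- the bit test in A depends only on n % 256 (for bit positions 0..7)
theorem pv_bitlem (n i : Int) (h0 : 0 ≤ i) (h8 : i < 8) :
    PySem.Int.band n ((1 : Int) <<< (i.toNat : Nat)) = PySem.Int.band (n % 256) ((1 : Int) <<< (i.toNat : Nat)) := by
  set j := i.toNat with hj
  have hjlt : j < 8 := by omega
  have hp : ((1 : Int) <<< j) = ((2 ^ j : Nat) : Int) := by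
    rw [Int.shiftLeft_eq]; push_cast; ring
  have hpn : (0 : Int) ≤ (1 : Int) <<< j := by rw [hp]; positivity
  have hptn : ((1 : Int) <<< j).toNat = 2 ^ j := by rw [hp]; omega
  have hr0 : (0 : Int) ≤ n % 256 := by omega
  by_cases hn : (0 : Int) ≤ n
  · have h1 : (n % 256).toNat = n.toNat % 256 := by omega
    simp only [PySem.Int.band, if_pos hn, if_pos hr0, if_pos hpn, hptn, h1]
    exact_mod_cast pv_nat_and_mod n.toNat j hjlt
  · have h1 : (n % 256).toNat = 255 - (-n - 1).toNat % 256 := by omega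
    simp only [PySem.Int.band, if_neg hn, if_pos hr0, if_pos hpn, hptn, h1]
    exact_mod_cast (pv_nat_compl (-n - 1).toNat j hjlt)

theorem pv_A_mod (n : Int) : swapNibbles n = swapNibbles (n % 256) := by
  simp only [swapNibbles, pv_pyRange_eval, List.foldl]
  rw [pv_bitlem n 7 (by norm_num) (by norm_num), pv_bitlem n 6 (by norm_num) (by norm_num),
      pv_bitlem n 5 (by norm_num) (by norm_num), pv_bitlem n 4 (by norm_num) (by norm_num),
      pv_bitlem n 3 (by norm_num) (by norm_num), pv_bitlem n 2 (by norm_num) (by norm_num),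
      pv_bitlem n 1 (by norm_num) (by norm_num), pv_bitlem n 0 (by norm_num) (by norm_num)]

theorem pv_B_mod (n : Int) : swapNibbles_alt n = swapNibbles_alt (n % 256) := by
  simp only [swapNibbles_alt]
  rw [PySem.Int.mod_eq_emod_of_pos (by norm_num : (0:Int) < 256),
      PySem.Int.mod_eq_emod_of_pos (by norm_num : (0:Int) < 256),
      Int.emod_emod_of_dvd n (by norm_num : (256:Int) ∣ 256)]

set_option maxRecDepth 8192 in
theorem pv_small : ∀ k : Fin 256, swapNibbles (k.val : Int) = swapNibbles_alt (k.val : Int) := by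
  decide

-- ===== VERDICT (by name: the statement is the Claim_ definition above) =====
theorem swapNibbles_spec : Claim_equal_swapNibbles := by
  intro n _
  show swapNibbles n = swapNibbles_alt n
  rw [pv_A_mod, pv_B_mod]
  have h1 : 0 ≤ n % 256 := by omega
  have h2 : n % 256 < 256 := by omega
  have h3 : n % 256 = (((n % 256).toNat : Nat) : Int) := by omega
  rw [h3]
  exact pv_small ⟨(n % 256).toNat, by omega⟩
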